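-- pv_equiv track=rewrite | github.com/pabloschwarzenberg/grader | tema2_ej2/tema2_ej2_3282a57681f27d830a4b5ea4c49ebd6f.py | amiguis
-- ===== SOURCE A (Python) =====
-- def amiguis(numero1,numero2):
--   count1=0
--   count2=0
--   for x in range(1,numero1):
--     if numero1%x ==0:
--       count1=count1+1
--   for x in range(1,numero2):
--     if numero2%x ==0:
--       count2=count2+1
--   if count1==count2:
--      return True
--   else:
--      return False
-- ===== SOURCE B (Python) =====
-- def _proper_count(n):
--     # number of proper divisors of n (divisors in [1, n)); 0 for n <= 1
--     if n <= 0: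
--         return 0
--     c = 0
--     i = 1
--     while i * i <= n:
--         if n % i == 0:
--             c += 1 if i * i == n else 2
--         i += 1
--     return c - 1
--
-- def amiguis(numero1, numero2):
--     return _proper_count(numero1) == _proper_count(numero2)
-- ===== Notes on version B (the rewrite author's own statement) =====
-- stated objective: faster
-- what changed: counts each number's proper divisors by scanning only up to sqrt(n) and counting each small divisor together with its cofactor (1 when i*i==n, else 2), then subtracting 1 for n itself, instead of testing every x in [1,n)
import Mathlib
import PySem

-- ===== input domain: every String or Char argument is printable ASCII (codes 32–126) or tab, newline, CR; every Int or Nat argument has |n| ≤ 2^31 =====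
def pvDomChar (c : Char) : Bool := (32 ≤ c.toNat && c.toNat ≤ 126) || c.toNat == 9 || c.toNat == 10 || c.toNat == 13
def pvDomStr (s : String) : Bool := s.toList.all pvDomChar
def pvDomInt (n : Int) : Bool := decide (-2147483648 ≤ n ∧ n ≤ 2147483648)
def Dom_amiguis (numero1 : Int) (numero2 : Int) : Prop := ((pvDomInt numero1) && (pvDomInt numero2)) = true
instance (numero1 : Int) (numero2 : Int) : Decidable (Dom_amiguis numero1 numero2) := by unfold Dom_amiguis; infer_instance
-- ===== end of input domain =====

-- B replaces A's linear scan over [1,n) by a sqrt-pairing divisor count (objective: faster, asymptotically).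

-- ===== PORT A =====
def amiguis (numero1 : Int) (numero2 : Int) : Bool :=
  let count1 := (PySem.List.pyRange 1 numero1 1).foldl
    (fun c x => if PySem.Int.mod numero1 x == 0 then c + 1 else c) (0 : Int)
  let count2 := (PySem.List.pyRange 1 numero2 1).foldl
    (fun c x => if PySem.Int.mod numero2 x == 0 then c + 1 else c) (0 : Int)
  count1 == count2

-- ===== PORT B =====
-- the 'while i*i <= n' loop of Source B's _proper_count
def pvAltLoop (n : Int) (i : Int) (c : Int) : Int :=
  if i * i ≤ n then
    pvAltLoop n (i + 1)
      (if PySem.Int.mod n i == 0 then (if i * i == n then c + 1 else c + 2) else c)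
  else c
termination_by (n + 1 - i).toNat
decreasing_by
  rename_i h
  have h4 : 4 * (i * i) ≥ 4 * i - 1 := by nlinarith [sq_nonneg (2 * i - 1)]
  have hin : i ≤ n := by nlinarith
  omega

def pvProperCount (n : Int) : Int :=
  if n ≤ 0 then 0 else pvAltLoop n 1 0 - 1

def amiguis_alt (numero1 : Int) (numero2 : Int) : Bool :=
  pvProperCount numero1 == pvProperCount numero2

-- ===== PRECONDITION & SPEC =====
def Spec_amiguis (numero1 : Int) (numero2 : Int) (out : Bool) : Prop := out = amiguis_alt numero1 numero2
instance (numero1 : Int) (numero2 : Int) (out : Bool) : Decidable (Spec_amiguis numero1 numero2 out) := by unfold Spec_amiguis; infer_instance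

-- ===== CLAIM (what is proved, stated in full; the proofs are below) =====
def Claim_equal_amiguis : Prop := ∀ (numero1 : Int) (numero2 : Int), Dom_amiguis numero1 numero2 → Spec_amiguis numero1 numero2 (amiguis numero1 numero2)

-- ===== LEMMAS AND PROOFS =====

-- A's loop count, written directly
def pvACount (n : Int) : Int :=
  (PySem.List.pyRange 1 n 1).foldl
    (fun c x => if PySem.Int.mod n x == 0 then c + 1 else c) (0 : Int)

-- divisors of n in [1, n]
noncomputable def pvDivs (n : Int) : Finset Int := (Finset.Icc 1 n).filter (fun e => e ∣ n)

-- divisors still to be counted by the loop at state i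
noncomputable def pvS (n : Int) (i : Int) : Finset Int :=
  (Finset.Icc 1 n).filter (fun e => e ∣ n ∧ (if e * e ≤ n then i ≤ e else i * e ≤ n))

theorem pvS_mem (n i e : Int) :
    e ∈ pvS n i ↔ 1 ≤ e ∧ e ≤ n ∧ e ∣ n ∧ (if e * e ≤ n then i ≤ e else i * e ≤ n) := by
  simp [pvS, Finset.mem_filter, Finset.mem_Icc, and_assoc]

theorem pvS_empty (n i : Int) (hi : 1 ≤ i) (h : ¬ i * i ≤ n) :
    pvS n i = ∅ := by
  ext e
  simp only [pvS_mem, Finset.notMem_empty, iff_false]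
  rintro ⟨he1, hen, hdvd, hcond⟩
  by_cases hee : e * e ≤ n
  · simp only [if_pos hee] at hcond
    nlinarith
  · simp only [if_neg hee] at hcond
    nlinarith

-- cofactor characterisation: large divisor no longer counted at i+1 must be n / i
theorem pvCofactor (n i e : Int) (he : 1 ≤ e) (hdvd : e ∣ n)
    (h1 : i * e ≤ n) (h2 : ¬ (i + 1) * e ≤ n) : n = e * i := by
  obtain ⟨k, hk⟩ := hdvd
  have hki : k = i := by nlinarith
  rw [hk, hki]

theorem pvS_step_not_dvd (n i : Int) (hi : 1 ≤ i)
    (hnd : ¬ i ∣ n) : pvS n i = pvS n (i + 1) := by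
  ext e
  simp only [pvS_mem]
  constructor
  · rintro ⟨he1, hen, hdvd, hcond⟩
    refine ⟨he1, hen, hdvd, ?_⟩
    by_cases hee : e * e ≤ n
    · simp only [if_pos hee] at *
      rcases lt_or_eq_of_le hcond with h | h
      · omega
      · exact absurd (h ▸ hdvd) hnd
    · simp only [if_neg hee] at *
      by_contra h2
      have := pvCofactor n i e he1 hdvd hcond h2
      exact hnd ⟨e, by linarith [this]⟩
  · rintro ⟨he1, hen, hdvd, hcond⟩
    refine ⟨he1, hen, hdvd, ?_⟩
    by_cases hee : e * e ≤ n
    · simp only [if_pos hee] at *; omega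
    · simp only [if_neg hee] at *; nlinarith

theorem pvS_step_sq (n i : Int) (hi : 1 ≤ i) (hdvd : i ∣ n)
    (hsq : i * i = n) :
    pvS n i = insert i (pvS n (i + 1)) ∧ i ∉ pvS n (i + 1) := by
  constructor
  · ext e
    simp only [pvS_mem, Finset.mem_insert]
    constructor
    · rintro ⟨he1, hen, hd, hcond⟩
      by_cases hee : e * e ≤ n
      · simp only [if_pos hee] at hcond
        rcases lt_or_eq_of_le hcond with h | h
        · exact Or.inr ⟨he1, hen, hd, by simp [if_pos hee]; omega⟩
        · exact Or.inl h.symm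
      · simp only [if_neg hee] at hcond
        exfalso; nlinarith
    · rintro (rfl | ⟨he1, hen, hd, hcond⟩)
      · exact ⟨hi, by nlinarith, hdvd, by simp [hsq.le]⟩
      · refine ⟨he1, hen, hd, ?_⟩
        by_cases hee : e * e ≤ n
        · simp only [if_pos hee] at *; omega
        · simp only [if_neg hee] at *; nlinarith
  · simp only [pvS_mem]
    rintro ⟨-, -, -, hcond⟩
    simp only [if_pos hsq.le] at hcond; omega

theorem pvS_step_two (n i : Int) (hn : 1 ≤ n) (hi : 1 ≤ i) (hdvd : i ∣ n)
    (hlt : i * i < n) :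
    pvS n i = insert i (insert (n / i) (pvS n (i + 1))) ∧
      i ∉ insert (n / i) (pvS n (i + 1)) ∧ n / i ∉ pvS n (i + 1) := by
  have hipos : 0 < i := hi
  have hj : n / i * i = n := Int.ediv_mul_cancel hdvd
  set j := n / i with hjdef
  have hj1 : 1 ≤ j := by nlinarith
  have hij : i < j := by nlinarith
  have hjn : j ≤ n := by nlinarith
  have hjj : ¬ j * j ≤ n := by nlinarith
  refine ⟨?_, ?_, ?_⟩
  · ext e
    simp only [pvS_mem, Finset.mem_insert]
    constructor
    · rintro ⟨he1, hen, hd, hcond⟩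
      by_cases hee : e * e ≤ n
      · simp only [if_pos hee] at hcond
        rcases lt_or_eq_of_le hcond with h | h
        · exact Or.inr (Or.inr ⟨he1, hen, hd, by simp [if_pos hee]; omega⟩)
        · exact Or.inl h.symm
      · simp only [if_neg hee] at hcond
        by_cases h2 : (i + 1) * e ≤ n
        · exact Or.inr (Or.inr ⟨he1, hen, hd, by simp [if_neg hee]; exact h2⟩)
        · have hne : n = e * i := pvCofactor n i e he1 hd hcond h2
          have : e = j := by
            have : e * i = j * i := by rw [← hne, hj]
            exact mul_right_cancel₀ (by omega) this
          exact Or.inr (Or.inl this)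
    · rintro (rfl | rfl | ⟨he1, hen, hd, hcond⟩)
      · exact ⟨hi, by nlinarith, hdvd, by simp [hlt.le]⟩
      · refine ⟨hj1, hjn, ⟨i, by linarith [hj]⟩, ?_⟩
        simp only [if_neg hjj]
        nlinarith
      · refine ⟨he1, hen, hd, ?_⟩
        by_cases hee : e * e ≤ n
        · simp only [if_pos hee] at *; omega
        · simp only [if_neg hee] at *; nlinarith
  · simp only [Finset.mem_insert, pvS_mem]
    rintro (h | ⟨-, -, -, hcond⟩)
    · omega
    · simp only [if_pos hlt.le] at hcond; omega
  · simp only [pvS_mem]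
    rintro ⟨-, -, -, hcond⟩
    simp only [if_neg hjj] at hcond
    nlinarith

theorem pvAltLoop_inv (n i c : Int) (hn : 1 ≤ n) (hi : 1 ≤ i) :
    pvAltLoop n i c = c + ((pvS n i).card : Int) := by
  fun_induction pvAltLoop n i c with
  | case1 i c hii ih =>
    have hi1 : (1 : Int) ≤ i + 1 := by omega
    simp only [dite_eq_ite] at ih
    rw [ih hi1]
    by_cases hd : i ∣ n
    · by_cases hsq : i * i = n
      · obtain ⟨hset, hnotmem⟩ := pvS_step_sq n i hi hd hsq
        rw [hset, Finset.card_insert_of_notMem hnotmem]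
        have : PySem.Int.mod n i == 0 := by
          simp [PySem.Int.mod_eq_zero_iff_dvd, hd]
        simp [this, hsq]
        ring
      · have hlt : i * i < n := lt_of_le_of_ne hii hsq
        obtain ⟨hset, hm1, hm2⟩ := pvS_step_two n i hn hi hd hlt
        rw [hset, Finset.card_insert_of_notMem hm1, Finset.card_insert_of_notMem hm2]
        have hmod : PySem.Int.mod n i == 0 := by
          simp [PySem.Int.mod_eq_zero_iff_dvd, hd]
        have hsq' : ¬ (i * i == n) := by simp [hsq]
        simp [hmod, hsq']
        ring
    · rw [pvS_step_not_dvd n i hi hd]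
      have hmod : ¬ (PySem.Int.mod n i == 0) := by
        simp [PySem.Int.mod_eq_zero_iff_dvd, hd]
      simp [hmod]
  | case2 i c hii =>
    rw [pvS_empty n i hi hii]
    simp

theorem pvS_one (n : Int) (hn : 1 ≤ n) : pvS n 1 = pvDivs n := by
  ext e
  simp only [pvS_mem, pvDivs, Finset.mem_filter, Finset.mem_Icc]
  constructor
  · rintro ⟨h1, h2, h3, -⟩; exact ⟨⟨h1, h2⟩, h3⟩
  · rintro ⟨⟨h1, h2⟩, h3⟩
    refine ⟨h1, h2, h3, ?_⟩
    by_cases hee : e * e ≤ n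
    · simp [hee, h1]
    · simp [hee]; linarith

theorem pvDivs_split (n : Int) (hn : 1 ≤ n) :
    pvDivs n = insert n ((Finset.Icc 1 (n - 1)).filter (fun e => e ∣ n)) ∧
      n ∉ (Finset.Icc 1 (n - 1)).filter (fun e => e ∣ n) := by
  constructor
  · ext e
    simp only [pvDivs, Finset.mem_filter, Finset.mem_Icc, Finset.mem_insert]
    constructor
    · rintro ⟨⟨h1, h2⟩, h3⟩
      rcases eq_or_lt_of_le h2 with h | h
      · exact Or.inl h
      · exact Or.inr ⟨⟨h1, by omega⟩, h3⟩
    · rintro (h | ⟨⟨h1, h2⟩, h3⟩)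
      · subst h; exact ⟨⟨by omega, by omega⟩, dvd_refl _⟩
      · exact ⟨⟨h1, by omega⟩, h3⟩
  · simp [Finset.mem_filter, Finset.mem_Icc]

-- A's fold equals the cardinality of the proper-divisor set
theorem pvACount_eq (n : Int) (hn : 1 ≤ n) :
    pvACount n = (((Finset.Icc 1 (n - 1)).filter (fun e => e ∣ n)).card : Int) := by
  unfold pvACount
  rw [PySem.List.foldl_if_add_one]
  rw [List.countP_eq_length_filter]
  have hnodup : (PySem.List.pyRange 1 n 1).Nodup := PySem.List.nodup_pyRange_one 1 n
  have hfn : ((PySem.List.pyRange 1 n 1).filter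
      (fun x => PySem.Int.mod n x == 0)).Nodup := hnodup.filter _
  rw [← List.toFinset_card_of_nodup hfn, List.toFinset_filter]
  have hset : ((PySem.List.pyRange 1 n 1).toFinset.filter
      (fun x => PySem.Int.mod n x == 0)) = (Finset.Icc 1 (n - 1)).filter (fun e => e ∣ n) := by
    ext e
    simp only [Finset.mem_filter, List.mem_toFinset, PySem.List.mem_pyRange_one,
      Finset.mem_Icc]
    constructor
    · rintro ⟨⟨h1, h2⟩, h3⟩
      exact ⟨⟨h1, by omega⟩, (PySem.Int.mod_eq_zero_iff_dvd n e).mp (by simpa using h3)⟩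
    · rintro ⟨⟨h1, h2⟩, h3⟩
      exact ⟨⟨h1, by omega⟩, by simpa using (PySem.Int.mod_eq_zero_iff_dvd n e).mpr h3⟩
  rw [hset]
  simp

-- the central fact: A's per-number count equals B's
theorem pvCount_eq (n : Int) : pvACount n = pvProperCount n := by
  by_cases hn : n ≤ 0
  · unfold pvACount pvProperCount
    rw [PySem.List.pyRange_one_eq_nil (by omega)]
    simp [hn]
  · have hn1 : 1 ≤ n := by omega
    rw [pvACount_eq n hn1]
    unfold pvProperCount
    rw [if_neg hn, pvAltLoop_inv n 1 0 hn1 le_rfl, pvS_one n hn1]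
    obtain ⟨hsplit, hnm⟩ := pvDivs_split n hn1
    rw [hsplit, Finset.card_insert_of_notMem hnm]
    push_cast; ring

-- ===== VERDICT (by name: the statement is the Claim_ definition above) =====
theorem amiguis_spec : Claim_equal_amiguis := by
  intro n1 n2 _
  unfold Spec_amiguis amiguis amiguis_alt
  rw [show (PySem.List.pyRange 1 n1 1).foldl
      (fun c x => if PySem.Int.mod n1 x == 0 then c + 1 else c) (0 : Int) = pvACount n1 from rfl,
    show (PySem.List.pyRange 1 n2 1).foldl
      (fun c x => if PySem.Int.mod n2 x == 0 then c + 1 else c) (0 : Int) = pvACount n2 from rfl,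
    pvCount_eq n1, pvCount_eq n2]
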